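-- pv_equiv track=rewrite | github.com/AlifSrSE/ProblemSolves | 2059C-customerService.py | solve
-- ===== SOURCE A (Python) =====
-- def solve(a):
--     last_one_counts = sorted(count_last_one(line) for line in a)
--
--     result = 0
--     needed = 0
--     for last_one_count in last_one_counts:
--         if last_one_count >= needed:
--             needed += 1
--             result += 1
--
--     return result
--
-- def count_last_one(line):
--     index = len(line)
--     while index >= 1 and line[index - 1] == 1:
--         index -= 1
--
--     return len(line) - index
-- ===== SOURCE B (Python) =====
-- def solve(a):
--     counts = [trailing_ones(line) for line in a]
--     freq = {}
--     for v in counts: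
--         freq[v] = freq.get(v, 0) + 1
--     maxv = max(counts, default=-1)
--     result = 0
--     needed = 0
--     for v in range(maxv + 1):
--         for _ in range(freq.get(v, 0)):
--             if v >= needed:
--                 needed += 1
--                 result += 1
--     return result
--
-- def trailing_ones(line):
--     c = 0
--     for x in reversed(line):
--         if x != 1:
--             break
--         c += 1
--     return c
-- ===== Notes on version B (the rewrite author's own statement) =====
-- stated objective: alternative
-- what changed: B replaces A's sort-then-scan with counting: it tallies trailing-ones values into a frequency dict and runs the greedy over values 0..max with per-value repetition, so no sort is performed; the trailing-ones helper walks the reversed line instead of A's index while-loop.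
import Mathlib
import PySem

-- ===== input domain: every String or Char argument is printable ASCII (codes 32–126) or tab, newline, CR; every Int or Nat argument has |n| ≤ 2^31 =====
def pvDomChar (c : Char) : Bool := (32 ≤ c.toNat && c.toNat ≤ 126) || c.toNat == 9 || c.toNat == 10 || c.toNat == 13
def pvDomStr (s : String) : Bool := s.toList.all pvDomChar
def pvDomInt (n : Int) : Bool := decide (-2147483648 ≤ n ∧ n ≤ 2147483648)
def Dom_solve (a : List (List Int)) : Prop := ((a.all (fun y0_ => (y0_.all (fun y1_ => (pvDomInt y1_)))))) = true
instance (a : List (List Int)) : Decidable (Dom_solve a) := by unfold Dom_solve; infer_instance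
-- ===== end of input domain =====

-- B replaces A's sort-then-scan greedy with a frequency-table (counting) traversal over values
-- 0..max; same return value, no sort. Objective: alternative algorithm, similar cost.

-- ===== PORT A =====
-- A's while loop 'index = len(line); while index >= 1 and line[index-1] == 1: index -= 1'
def cloLoop (line : List Int) : Nat → Nat
  | 0 => 0
  | i + 1 => if line.getD i 0 = 1 then cloLoop line i else i + 1

def countLastOne (line : List Int) : Int :=
  (line.length : Int) - (cloLoop line line.length : Int)

def solve (a : List (List Int)) : Int :=
  let lastOneCounts := PySem.List.sorted (a.map countLastOne) (fun x => x) false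
  (lastOneCounts.foldl
    (fun (p : Int × Int) c => if c ≥ p.2 then (p.1 + 1, p.2 + 1) else p) (0, 0)).1

-- ===== PORT B =====
-- B's 'for x in reversed(line): if x != 1: break; c += 1'
def trailingOnesAux : List Int → Int
  | [] => 0
  | x :: t => if x ≠ 1 then 0 else trailingOnesAux t + 1

def trailingOnes (line : List Int) : Int := trailingOnesAux line.reverse

def solve_alt (a : List (List Int)) : Int :=
  let counts := a.map trailingOnes
  let freq := counts.foldl (fun d v => d.insert v (d.getD v 0 + 1)) PySem.Dict.empty
  let maxv := PySem.List.maxD counts (fun x => x) (-1)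
  ((PySem.List.pyRange 0 (maxv + 1) 1).foldl
    (fun (p : Int × Int) v =>
      (PySem.List.pyRange 0 (freq.getD v 0) 1).foldl
        (fun (q : Int × Int) _ => if v ≥ q.2 then (q.1 + 1, q.2 + 1) else q) p)
    (0, 0)).1

-- ===== PRECONDITION & SPEC =====
def Spec_solve (a : List (List Int)) (out : Int) : Prop := out = solve_alt a
instance (a : List (List Int)) (out : Int) : Decidable (Spec_solve a out) := by unfold Spec_solve; infer_instance

-- ===== CLAIM (what is proved, stated in full; the proofs are below) =====
def Claim_equal_solve : Prop := ∀ (a : List (List Int)), Dom_solve a → Spec_solve a (solve a)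

-- ===== LEMMAS AND PROOFS =====

theorem trailingOnesAux_nonneg (l : List Int) : 0 ≤ trailingOnesAux l := by
  induction l with
  | nil => simp [trailingOnesAux]
  | cons x t ih => simp only [trailingOnesAux]; split <;> omega

theorem cloLoop_le (line : List Int) : ∀ i, cloLoop line i ≤ i := by
  intro i; induction i with
  | zero => simp [cloLoop]
  | succ n ih => simp only [cloLoop]; split <;> omega

theorem cloLoop_append (l : List Int) (x : Int) :
    ∀ i, i ≤ l.length → cloLoop (l ++ [x]) i = cloLoop l i := by
  intro i; induction i with
  | zero => intro _; rfl
  | succ n ih =>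
    intro h
    have hn : n < l.length := by omega
    have hg : (l ++ [x]).getD n 0 = l.getD n 0 := by
      simp [List.getD, List.getElem?_append_left hn]
    simp only [cloLoop, hg]
    split
    · exact ih (by omega)
    · rfl

theorem countLastOne_eq (line : List Int) : countLastOne line = trailingOnes line := by
  induction line using List.reverseRecOn with
  | nil => rfl
  | append_singleton l x ih =>
    have hlen : (l ++ [x]).length = l.length + 1 := by simp
    have hg : (l ++ [x]).getD l.length 0 = x := by
      simp [List.getD]
    by_cases hx : x = 1
    · subst hx
      have h1 : cloLoop (l ++ [1]) (l.length + 1) = cloLoop l l.length := by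
        show (if (l ++ [1]).getD l.length 0 = 1 then cloLoop (l ++ [1]) l.length
              else l.length + 1) = _
        rw [hg, if_pos rfl]
        exact cloLoop_append l 1 l.length le_rfl
      have h2 : trailingOnes (l ++ [1]) = trailingOnes l + 1 := by
        simp [trailingOnes, trailingOnesAux]
      have hle := cloLoop_le l l.length
      rw [countLastOne, hlen, h1, h2, ← ih, countLastOne]
      push_cast
      omega
    · have h1 : cloLoop (l ++ [x]) (l.length + 1) = l.length + 1 := by
        show (if (l ++ [x]).getD l.length 0 = 1 then cloLoop (l ++ [x]) l.length
              else l.length + 1) = _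
        rw [hg, if_neg hx]
      have h2 : trailingOnes (l ++ [x]) = 0 := by
        simp [trailingOnes, trailingOnesAux, hx]
      rw [countLastOne, hlen, h1, h2]
      push_cast
      omega

theorem foldl_const_len {α β γ : Type} (g : γ → γ) :
    ∀ (l : List α) (l' : List β) (p : γ), l.length = l'.length →
      l.foldl (fun q _ => g q) p = l'.foldl (fun q _ => g q) p := by
  intro l
  induction l with
  | nil => intro l' p h; cases l' with
    | nil => rfl
    | cons y t => simp at h
  | cons x t ih =>
    intro l' p h
    cases l' with
    | nil => simp at h
    | cons y t' =>
      simp only [List.foldl_cons]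
      exact ih t' (g p) (by simpa using h)

theorem foldl_replicate_const {γ : Type} (f : γ → Int → γ) (v : Int) :
    ∀ (n : Nat) (p : γ), (List.replicate n v).foldl f p
      = (List.replicate n v).foldl (fun q _ => f q v) p := by
  intro n
  induction n with
  | zero => intro p; rfl
  | succ m ih => intro p; simp only [List.replicate_succ, List.foldl_cons]; exact ih _

-- sum of per-bucket counts over a value range
theorem sum_count_buckets (cs : List Int) (x : Int) (b : Int) :
    ∀ (a : Int),
      ((PySem.List.pyRange a b 1).map
        (fun v => List.count x (List.replicate (cs.count v) v))).sum
      = if a ≤ x ∧ x < b then cs.count x else 0 := by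
  have key : ∀ (k : Nat) (a : Int), (b - a).toNat = k →
      ((PySem.List.pyRange a b 1).map
        (fun v => List.count x (List.replicate (cs.count v) v))).sum
      = if a ≤ x ∧ x < b then cs.count x else 0 := by
    intro k
    induction k with
    | zero =>
      intro a hk
      have hba : b ≤ a := by omega
      rw [PySem.List.pyRange_one_eq_nil hba]
      simp
      omega
    | succ m ih =>
      intro a hk
      have hab : a < b := by omega
      rw [PySem.List.pyRange_one_cons hab]
      simp only [List.map_cons, List.sum_cons]
      rw [ih (a + 1) (by omega), List.count_replicate]
      simp only [beq_iff_eq]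
      by_cases h1 : a = x
      · subst h1
        rw [if_pos rfl, if_neg (by omega : ¬(a + 1 ≤ a ∧ a < b)), if_pos ⟨le_rfl, hab⟩]
        omega
      · rw [if_neg h1]
        by_cases h2 : a + 1 ≤ x ∧ x < b
        · rw [if_pos h2, if_pos ⟨by omega, h2.2⟩]
          omega
        · rw [if_neg h2, if_neg (by omega)]
  intro a
  exact key (b - a).toNat a rfl

theorem solve_eq (a : List (List Int)) : solve a = solve_alt a := by
  have hmap : a.map countLastOne = a.map trailingOnes :=
    List.map_congr_left (fun l _ => countLastOne_eq l)
  simp only [solve, solve_alt]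
  rw [hmap]
  set cs := a.map trailingOnes with hcs
  set maxv := PySem.List.maxD cs (fun x => x) (-1) with hmv
  have hnn : ∀ v ∈ cs, 0 ≤ v := by
    intro v hv
    rw [hcs] at hv
    obtain ⟨l, _, rfl⟩ := List.mem_map.mp hv
    exact trailingOnesAux_nonneg l.reverse
  have hub : ∀ v ∈ cs, v ≤ maxv := by
    intro v hv
    rcases hm : PySem.List.max? cs (fun x => x) with _ | m
    · rw [(PySem.List.max?_eq_none_iff cs _).mp hm] at hv; simp at hv
    · have := PySem.List.max?_isMax hm v hv
      rw [hmv]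
      simp only [PySem.List.maxD, hm, Option.getD_some]
      exact this
  set BL := (PySem.List.pyRange 0 (maxv + 1) 1).flatMap
      (fun v => List.replicate (cs.count v) v) with hBL
  have hperm : BL.Perm cs := by
    rw [List.perm_iff_count]
    intro x
    rw [hBL, List.count_flatMap]
    simp only [Function.comp_def]
    rw [sum_count_buckets cs x (maxv + 1) 0]
    by_cases hx : 0 ≤ x ∧ x < maxv + 1
    · rw [if_pos hx]
    · rw [if_neg hx]
      symm
      rw [List.count_eq_zero]
      intro hmem
      exact hx ⟨hnn x hmem, by have := hub x hmem; omega⟩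
  have hpw : BL.Pairwise (· ≤ ·) := by
    rw [hBL, List.pairwise_flatMap]
    constructor
    · intro v _
      exact List.pairwise_replicate.mpr (Or.inr le_rfl)
    · have := PySem.List.pairwise_lt_pyRange_one 0 (maxv + 1)
      refine this.imp ?_
      intro v w hvw y hy z hz
      rw [List.eq_of_mem_replicate hy, List.eq_of_mem_replicate hz]
      exact le_of_lt hvw
  have hsorted : PySem.List.sorted cs (fun x => x) false = BL :=
    PySem.List.sorted_id_eq_of_perm_of_pairwise cs BL hperm hpw
  have hfreq : cs.foldl (fun d v => d.insert v (d.getD v 0 + 1)) PySem.Dict.empty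
      = PySem.Dict.counter cs := PySem.Dict.foldl_insert_getD_add_one_eq_counter cs
  have hinner : ∀ (v : Int) (p : Int × Int),
      (PySem.List.pyRange 0 ((PySem.Dict.counter cs).getD v 0) 1).foldl
        (fun (q : Int × Int) _ => if v ≥ q.2 then (q.1 + 1, q.2 + 1) else q) p
      = (List.replicate (cs.count v) v).foldl
        (fun (q : Int × Int) c => if c ≥ q.2 then (q.1 + 1, q.2 + 1) else q) p := by
    intro v p
    rw [PySem.Dict.getD_counter]
    rw [foldl_replicate_const]
    apply foldl_const_len
    rw [PySem.List.length_pyRange_one, List.length_replicate]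
    omega
  rw [hsorted, hfreq, hBL, List.foldl_flatMap]
  have hfun : (fun (p : Int × Int) v =>
        (PySem.List.pyRange 0 ((PySem.Dict.counter cs).getD v 0) 1).foldl
          (fun (q : Int × Int) _ => if v ≥ q.2 then (q.1 + 1, q.2 + 1) else q) p)
      = (fun (p : Int × Int) v => (List.replicate (cs.count v) v).foldl
          (fun (q : Int × Int) c => if c ≥ q.2 then (q.1 + 1, q.2 + 1) else q) p) := by
    funext p v
    exact hinner v p
  rw [hfun]

-- ===== VERDICT (by name: the statement is the Claim_ definition above) =====
theorem solve_spec : Claim_equal_solve := by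
  intro a _
  unfold Spec_solve
  exact solve_eq a
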